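-- pv_equiv track=rewrite | github.com/sangjunyooart/keepsake-migration | helper/monitoring/dashboard.py | _agent_overall_status
-- ===== SOURCE A (Python) =====
-- def _agent_overall_status(states: dict) -> str:
--     statuses = [v.get("status", "idle") for v in states.values()]
--     if "running" in statuses:
--         return "running"
--     if "error" in statuses:
--         return "error"
--     if all(s == "idle" for s in statuses):
--         return "idle"
--     return "active"
-- ===== SOURCE B (Python) =====
-- def _agent_overall_status(states: dict) -> str:
--     rank = {"idle": 0, "error": 2, "running": 3}
--     worst = 0
--     for v in states.values():
--         worst = max(worst, rank.get(v.get("status", "idle"), 1))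
--     return ("idle", "active", "error", "running")[worst]
-- ===== Notes on version B (the rewrite author's own statement) =====
-- stated objective: alternative
-- what changed: Replaces the statuses list and its staged membership/all tests with a severity-rank reduction: each status is mapped to a numeric rank (idle=0, other=1, error=2, running=3), the maximum rank is folded over the values, and the answer is read from a lookup table.
import Mathlib
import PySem

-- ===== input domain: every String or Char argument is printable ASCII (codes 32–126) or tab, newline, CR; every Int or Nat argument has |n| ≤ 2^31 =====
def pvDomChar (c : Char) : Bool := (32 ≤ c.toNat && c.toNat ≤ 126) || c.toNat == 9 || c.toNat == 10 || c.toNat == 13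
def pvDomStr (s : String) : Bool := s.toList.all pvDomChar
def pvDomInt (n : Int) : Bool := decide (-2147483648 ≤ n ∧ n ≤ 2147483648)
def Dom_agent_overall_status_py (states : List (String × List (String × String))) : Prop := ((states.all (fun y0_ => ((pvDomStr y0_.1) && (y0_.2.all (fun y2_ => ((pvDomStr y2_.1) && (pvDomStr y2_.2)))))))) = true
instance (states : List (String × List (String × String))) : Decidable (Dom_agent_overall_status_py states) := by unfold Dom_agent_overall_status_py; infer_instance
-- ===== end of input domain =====

-- B replaces A's statuses list and staged membership/all tests with a severity-rank max-reduction plus a lookup table; same result, different algorithm.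

-- ===== PORT A =====
def agent_overall_status_py (states : List (String × List (String × String))) : String :=
  let statuses := states.map (fun v => (PySem.Dict.mk v.2).getD "status" "idle")
  if statuses.contains "running" then "running"
  else if statuses.contains "error" then "error"
  else if statuses.all (fun s => s == "idle") then "idle"
  else "active"

-- ===== PORT B =====
-- rank.get(v.get("status","idle"), 1): the severity of one agent's status
def pvRankB (v : String × List (String × String)) : Nat :=
  (PySem.Dict.mk [("idle", 0), ("error", 2), ("running", 3)]).getD
    ((PySem.Dict.mk v.2).getD "status" "idle") 1

def agent_overall_status_py_alt (states : List (String × List (String × String))) : String :=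
  let worst := states.foldl (fun worst v => max worst (pvRankB v)) 0
  -- tuple indexing ("idle","active","error","running")[worst]; worst ≤ 3 by construction
  match worst with
  | 0 => "idle"
  | 1 => "active"
  | 2 => "error"
  | _ => "running"

-- ===== PRECONDITION & SPEC =====
def Spec_agent_overall_status_py (states : List (String × List (String × String))) (out : String) : Prop := out = agent_overall_status_py_alt states
instance (states : List (String × List (String × String))) (out : String) : Decidable (Spec_agent_overall_status_py states out) := by unfold Spec_agent_overall_status_py; infer_instance

-- ===== CLAIM (what is proved, stated in full; the proofs are below) =====
def Claim_equal_agent_overall_status_py : Prop := ∀ (states : List (String × List (String × String))), Dom_agent_overall_status_py states → Spec_agent_overall_status_py states (agent_overall_status_py states)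

-- ===== LEMMAS AND PROOFS =====

def pvStatusOf (v : String × List (String × String)) : String :=
  (PySem.Dict.mk v.2).getD "status" "idle"

theorem pvRankB_eq (v : String × List (String × String)) :
    pvRankB v = (if pvStatusOf v = "running" then 3
                 else if pvStatusOf v = "error" then 2
                 else if pvStatusOf v = "idle" then 0 else 1) := by
  unfold pvRankB pvStatusOf
  generalize (PySem.Dict.mk v.2).getD "status" "idle" = s
  by_cases h1 : s = "running"
  · subst h1; decide
  by_cases h2 : s = "error"
  · subst h2; decide
  by_cases h3 : s = "idle"
  · subst h3; decide
  · have e1 : (("idle" : String) == s) = false := beq_eq_false_iff_ne.mpr (Ne.symm h3)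
    have e2 : (("error" : String) == s) = false := beq_eq_false_iff_ne.mpr (Ne.symm h2)
    have e3 : (("running" : String) == s) = false := beq_eq_false_iff_ne.mpr (Ne.symm h1)
    simp [PySem.Dict.getD, PySem.Dict.get?, List.find?, e1, e2, e3, h1, h2, h3]

-- the max-fold of B, generalised over the accumulator, equals A's staged tests as a nested if
theorem worst_char (states : List (String × List (String × String))) (m : Nat) :
    states.foldl (fun worst v => max worst (pvRankB v)) m =
      max m (if states.any (fun v => pvStatusOf v == "running") then 3
             else if states.any (fun v => pvStatusOf v == "error") then 2
             else if states.any (fun v => pvStatusOf v != "idle") then 1 else 0) := by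
  induction states generalizing m with
  | nil => simp
  | cons h t ih =>
    rw [List.foldl_cons, ih, pvRankB_eq]
    simp only [List.any_cons, Bool.or_eq_true, beq_iff_eq, bne_iff_ne, ne_eq]
    by_cases h1 : pvStatusOf h = "running" <;>
    by_cases h2 : pvStatusOf h = "error" <;>
    by_cases h3 : pvStatusOf h = "idle" <;>
    simp only [h1, h2, h3, not_true, not_false_iff, true_or, false_or, if_neg, if_pos] <;>
    split_ifs <;> first | omega | tauto

-- ===== VERDICT (by name: the statement is the Claim_ definition above) =====
theorem agent_overall_status_py_spec : Claim_equal_agent_overall_status_py := by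
  intro states _
  unfold Spec_agent_overall_status_py agent_overall_status_py agent_overall_status_py_alt
  rw [worst_char]
  simp only [Nat.zero_max, List.contains_eq_any_beq, List.any_map, List.all_map,
    Function.comp_def]
  have hrun : states.any (fun v => "running" == (PySem.Dict.mk v.2).getD "status" "idle")
      = states.any (fun v => pvStatusOf v == "running") := by
    exact List.any_congr rfl (fun v => BEq.comm ..)
  have herr : states.any (fun v => "error" == (PySem.Dict.mk v.2).getD "status" "idle")
      = states.any (fun v => pvStatusOf v == "error") := by
    exact List.any_congr rfl (fun v => BEq.comm ..)
  have hidle : states.all (fun v => (PySem.Dict.mk v.2).getD "status" "idle" == "idle")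
      = !states.any (fun v => pvStatusOf v != "idle") := by
    simp [List.all_eq_not_any_not, bne, pvStatusOf]
  rw [hrun, herr, hidle]
  by_cases a1 : states.any (fun v => pvStatusOf v == "running") <;>
  by_cases a2 : states.any (fun v => pvStatusOf v == "error") <;>
  by_cases a3 : states.any (fun v => pvStatusOf v != "idle") <;>
  simp [a1, a2, a3]
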